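-- pv_equiv track=rewrite | github.com/swarga1234/GEEKS_FOR_GEEKS_PRACTICE | String/String_Practice2.py | modified
-- ===== SOURCE A (Python) =====
-- def modified(s):
--
--     count=1
--     res=0
--     n=len(s)
--
--     for i in range(1,n):
--         if s[i]==s[i-1]:
--             count+=1
--         else:
--             count=1
--
--         if count==3:
--             res+=1
--             count=1
--
--     return res
-- ===== SOURCE B (Python) =====
-- def modified(s):
--     res = 0
--     i = 0
--     n = len(s)
--     while i < n:
--         j = i
--         while j < n and s[j] == s[i]:
--             j += 1
--         res += (j - i - 1) // 2
--         i = j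
--     return res
-- ===== Notes on version B (the rewrite author's own statement) =====
-- stated objective: alternative
-- what changed: B jumps run by run with an inner scan that finds each maximal run's end and adds the closed-form per-run contribution (L-1)//2 (A's counter resets to 1 after each detected triple, so a run of length L contributes (L-1)//2), instead of A's single pass with an incrementally maintained counter and reset.
import Mathlib
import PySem

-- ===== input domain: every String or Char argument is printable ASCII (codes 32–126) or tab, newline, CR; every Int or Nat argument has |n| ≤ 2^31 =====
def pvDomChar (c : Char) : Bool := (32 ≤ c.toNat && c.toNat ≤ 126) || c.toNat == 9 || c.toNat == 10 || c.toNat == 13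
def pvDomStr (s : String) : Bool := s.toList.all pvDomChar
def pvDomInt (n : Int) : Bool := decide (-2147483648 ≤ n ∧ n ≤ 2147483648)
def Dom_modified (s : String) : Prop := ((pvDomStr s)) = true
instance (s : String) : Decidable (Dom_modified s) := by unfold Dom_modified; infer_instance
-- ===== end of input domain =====

-- B replaces A's incrementally maintained counter-with-reset pass by a run-by-run scan that
-- finds each maximal run's end and adds the closed-form per-run contribution (L-1)/2;
-- objective: alternative (same O(n) cost).

-- ===== PORT A =====
-- A's loop `for i in range(1,n)` ported as structural recursion over the remaining
-- characters, carrying the previous character and the (count, res) state exactly as A does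
def modifiedGo (prev : Char) (count res : Int) : List Char → Int
  | [] => res
  | c :: rest =>
    let count' := if c == prev then count + 1 else 1
    if count' == 3 then modifiedGo c 1 (res + 1) rest
    else modifiedGo c count' res rest

def modified (s : String) : Int :=
  match s.toList with
  | [] => 0
  | c :: rest => modifiedGo c 1 0 rest

-- ===== PORT B =====
-- inner `while j < n and s[j] == s[i]` of Source B, returning the final j
def bInner (l : List Char) (n i j : Nat) : Nat :=
  if j < n ∧ l.getD j ' ' == l.getD i ' ' then bInner l n i (j + 1) else j
termination_by n - j
decreasing_by omega

-- termination facts for the outer loop (cited by bOuter's decreasing_by)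
theorem bInner_ge_aux (l : List Char) (n i : Nat) :
    ∀ (k j : Nat), n - j ≤ k → j ≤ bInner l n i j := by
  intro k
  induction k with
  | zero =>
    intro j hj
    rw [bInner, if_neg (by omega)]
  | succ k ih =>
    intro j hj
    by_cases h : j < n ∧ l.getD j ' ' == l.getD i ' '
    · rw [bInner, if_pos h]
      have := ih (j + 1) (by omega)
      omega
    · rw [bInner, if_neg h]

theorem bInner_gt (l : List Char) (n i : Nat) (h : i < n) : i < bInner l n i i := by
  rw [bInner, if_pos ⟨h, by simp⟩]
  have := bInner_ge_aux l n i n (i + 1) (by omega)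
  omega

-- outer `while i < n` of Source B (the loop-local j = bInner l n i i is written inline);
-- `(j - i - 1) // 2` is Python floor division of nonnegative ints, exact as Nat division here
def bOuter (l : List Char) (n i : Nat) (res : Int) : Int :=
  if h : i < n then
    bOuter l n (bInner l n i i) (res + ((bInner l n i i - i - 1) / 2 : Nat))
  else res
termination_by n - i
decreasing_by
  have := bInner_gt l n i h
  omega

def modified_alt (s : String) : Int := bOuter s.toList s.toList.length 0 0

-- ===== PRECONDITION & SPEC =====
def Spec_modified (s : String) (out : Int) : Prop := out = modified_alt s
instance (s : String) (out : Int) : Decidable (Spec_modified s out) := by unfold Spec_modified; infer_instance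

-- ===== CLAIM (what is proved, stated in full; the proofs are below) =====
def Claim_equal_modified : Prop := ∀ (s : String), Dom_modified s → Spec_modified s (modified s)

-- ===== LEMMAS AND PROOFS =====

-- proof-only bridge: both programs sum floor((L-1)/2) over the maximal-run lengths L
def runLensGo (c : Char) (k : Nat) : List Char → List Nat
  | [] => [k]
  | x :: xs => if x == c then runLensGo c (k + 1) xs else k :: runLensGo x 1 xs

def runLens : List Char → List Nat
  | [] => []
  | c :: xs => runLensGo c 1 xs

theorem runLensGo_eq (c : Char) : ∀ (t : List Char) (k : Nat),
    runLensGo c k t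
      = (k + (t.takeWhile (fun d => d == c)).length) :: runLens (t.dropWhile (fun d => d == c)) := by
  intro t
  induction t with
  | nil => intro k; simp [runLensGo, runLens]
  | cons x xs ih =>
    intro k
    by_cases h : x = c
    · subst h
      rw [runLensGo, if_pos (by simp), ih (k + 1)]
      rw [List.takeWhile_cons, if_pos (by simp), List.dropWhile_cons, if_pos (by simp)]
      simp only [List.length_cons]
      congr 1
      omega
    · have hb : (x == c) = false := by simp [h]
      rw [runLensGo, if_neg (by simp [hb])]
      rw [List.takeWhile_cons, if_neg (by simp [hb]), List.dropWhile_cons, if_neg (by simp [hb])]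
      simp [runLens]

theorem runLens_cons (c : Char) (xs : List Char) :
    runLens (c :: xs)
      = ((xs.takeWhile (fun d => d == c)).length + 1) :: runLens (xs.dropWhile (fun d => d == c)) := by
  rw [runLens, runLensGo_eq]
  congr 1
  omega

-- A's per-run sum: floor((L-1)/2) per maximal run, written over takeWhile/dropWhile
def sumA : List Char → Int
  | [] => 0
  | c :: xs => ((xs.takeWhile (fun d => d == c)).length / 2 : Nat) + sumA (xs.dropWhile (fun d => d == c))
termination_by l => l.length
decreasing_by
  have := List.length_dropWhile_le (fun d => d == c) xs
  simp only [List.length_cons]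
  omega

theorem modifiedGo_run : ∀ (xs : List Char) (c : Char) (res : Int),
    (modifiedGo c 1 res xs
      = res + ((xs.takeWhile (fun d => d == c)).length / 2 : Nat)
          + sumA (xs.dropWhile (fun d => d == c)))
    ∧ (modifiedGo c 2 res xs
      = res + (((xs.takeWhile (fun d => d == c)).length + 1) / 2 : Nat)
          + sumA (xs.dropWhile (fun d => d == c))) := by
  intro xs
  induction xs with
  | nil => intro c res; simp [modifiedGo, sumA]
  | cons x t ih =>
    intro c res
    by_cases h : x = c
    · subst h
      have htw : (x :: t).takeWhile (fun d => d == x) = x :: t.takeWhile (fun d => d == x) := by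
        rw [List.takeWhile_cons, if_pos (by simp)]
      have hdw : (x :: t).dropWhile (fun d => d == x) = t.dropWhile (fun d => d == x) := by
        rw [List.dropWhile_cons, if_pos (by simp)]
      constructor
      · -- count 1 → 2, no triple detected
        have hstep : modifiedGo x 1 res (x :: t) = modifiedGo x 2 res t := by
          simp [modifiedGo]
        rw [hstep, (ih x res).2, htw, hdw, List.length_cons]
      · -- count 2 → 3: triple found, counter reset to 1
        have hstep : modifiedGo x 2 res (x :: t) = modifiedGo x 1 (res + 1) t := by
          simp [modifiedGo]
        rw [hstep, (ih x (res + 1)).1, htw, hdw, List.length_cons]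
        have h2 : ((t.takeWhile (fun d => d == x)).length + 1 + 1) / 2
            = (t.takeWhile (fun d => d == x)).length / 2 + 1 := by omega
        rw [h2, Nat.cast_add, Nat.cast_one]
        ring
    · have hb : (x == c) = false := by simp [h]
      have htw : (x :: t).takeWhile (fun d => d == c) = [] := by
        rw [List.takeWhile_cons, if_neg (by simp [hb])]
      have hdw : (x :: t).dropWhile (fun d => d == c) = x :: t := by
        rw [List.dropWhile_cons, if_neg (by simp [hb])]
      have hsum : sumA (x :: t)
          = ((t.takeWhile (fun d => d == x)).length / 2 : Nat)
              + sumA (t.dropWhile (fun d => d == x)) := by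
        simp [sumA]
      constructor
      · have hstep : modifiedGo c 1 res (x :: t) = modifiedGo x 1 res t := by
          simp [modifiedGo, hb]
        rw [hstep, (ih x res).1, htw, hdw, hsum, List.length_nil]
        norm_num
        ring
      · have hstep : modifiedGo c 2 res (x :: t) = modifiedGo x 1 res t := by
          simp [modifiedGo, hb]
        rw [hstep, (ih x res).1, htw, hdw, hsum, List.length_nil]
        norm_num
        ring

theorem sumA_runLens : ∀ l : List Char,
    sumA l = ((runLens l).map (fun L => (((L - 1) / 2 : Nat) : Int))).sum := by
  intro l
  induction l using sumA.induct with
  | case1 => simp [sumA, runLens]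
  | case2 c xs ih =>
    rw [runLens_cons]
    simp only [List.map_cons, List.sum_cons, Nat.add_sub_cancel]
    rw [← ih]
    simp [sumA]

theorem modified_eq_sum (s : String) :
    modified s = ((runLens s.toList).map (fun L => (((L - 1) / 2 : Nat) : Int))).sum := by
  rw [← sumA_runLens]
  unfold modified
  cases h : s.toList with
  | nil => simp [sumA]
  | cons c rest =>
    show modifiedGo c 1 0 rest = sumA (c :: rest)
    rw [(modifiedGo_run rest c 0).1]
    have hsum : sumA (c :: rest)
        = ((rest.takeWhile (fun d => d == c)).length / 2 : Nat)
            + sumA (rest.dropWhile (fun d => d == c)) := by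
      simp [sumA]
    rw [hsum]
    ring

theorem dropWhile_eq_drop_tw {α : Type} (p : α → Bool) :
    ∀ xs : List α, xs.dropWhile p = xs.drop (xs.takeWhile p).length := by
  intro xs
  induction xs with
  | nil => simp
  | cons a t ih =>
    by_cases h : p a
    · rw [List.dropWhile_cons, if_pos h, List.takeWhile_cons, if_pos h, List.length_cons,
          List.drop_succ_cons, ih]
    · rw [List.dropWhile_cons, if_neg (by simp [h]), List.takeWhile_cons, if_neg (by simp [h])]
      simp

theorem bInner_spec (l : List Char) (i : Nat) : ∀ (k j : Nat), l.length - j ≤ k →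
    bInner l l.length i j = j + ((l.drop j).takeWhile (fun d => d == l.getD i ' ')).length := by
  intro k
  induction k with
  | zero =>
    intro j hj
    rw [bInner, if_neg (by omega), List.drop_eq_nil_of_le (by omega)]
    simp
  | succ k ih =>
    intro j hj
    by_cases h : j < l.length
    · have hdrop : l.drop j = l[j] :: l.drop (j + 1) := (List.getElem_cons_drop h).symm
      have hgd : l.getD j ' ' = l[j] := List.getD_eq_getElem l ' ' h
      by_cases heq : (l.getD j ' ' == l.getD i ' ') = true
      · rw [bInner, if_pos ⟨h, heq⟩, ih (j + 1) (by omega), hdrop, List.takeWhile_cons,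
            if_pos (by rw [← hgd]; exact heq)]
        rw [List.length_cons]
        omega
      · rw [bInner, if_neg (by tauto), hdrop, List.takeWhile_cons,
            if_neg (by rw [← hgd]; exact heq)]
        simp
    · rw [bInner, if_neg (by omega), List.drop_eq_nil_of_le (by omega)]
      simp

theorem bOuter_spec (l : List Char) : ∀ (k i : Nat) (res : Int), l.length - i ≤ k →
    bOuter l l.length i res
      = res + ((runLens (l.drop i)).map (fun L => (((L - 1) / 2 : Nat) : Int))).sum := by
  intro k
  induction k with
  | zero =>
    intro i res hi
    rw [bOuter, dif_neg (by omega), List.drop_eq_nil_of_le (by omega)]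
    simp [runLens]
  | succ k ih =>
    intro i res hi
    by_cases h : i < l.length
    · have hdrop : l.drop i = l[i] :: l.drop (i + 1) := (List.getElem_cons_drop h).symm
      have hgd : l.getD i ' ' = l[i] := List.getD_eq_getElem l ' ' h
      have hj : bInner l l.length i i
          = i + 1 + ((l.drop (i + 1)).takeWhile (fun d => d == l[i])).length := by
        rw [bInner_spec l i l.length i (by omega), hgd, hdrop, List.takeWhile_cons,
            if_pos (by simp), List.length_cons]
        omega
      have hdd : (l.drop (i + 1)).dropWhile (fun d => d == l[i])
          = l.drop (i + 1 + ((l.drop (i + 1)).takeWhile (fun d => d == l[i])).length) := by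
        rw [dropWhile_eq_drop_tw, List.drop_drop]
      rw [bOuter, dif_pos h, hj]
      have h4 : i + 1 + ((l.drop (i + 1)).takeWhile (fun d => d == l[i])).length - i - 1
          = ((l.drop (i + 1)).takeWhile (fun d => d == l[i])).length := by omega
      rw [h4, ih _ _ (by omega), hdrop, runLens_cons, hdd]
      simp only [List.map_cons, List.sum_cons, Nat.add_sub_cancel]
      ring
    · rw [bOuter, dif_neg h, List.drop_eq_nil_of_le (by omega)]
      simp [runLens]

theorem alt_eq_sum (s : String) :
    modified_alt s = ((runLens s.toList).map (fun L => (((L - 1) / 2 : Nat) : Int))).sum := by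
  unfold modified_alt
  rw [bOuter_spec s.toList s.toList.length 0 0 (by omega)]
  simp

-- ===== VERDICT (by name: the statement is the Claim_ definition above) =====
theorem modified_spec : Claim_equal_modified := by
  intro s _
  unfold Spec_modified
  rw [modified_eq_sum, alt_eq_sum]
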